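-- pv_equiv track=rewrite | github.com/MrBrantCode/unitest_baseline | mut_generate/mist_train_cf/cf_80647/solution.py | replace_special_symbols
-- ===== SOURCE A (Python) =====
-- def replace_special_symbols(text):
--     special_characters = "!\"#$%&'()*+,-./:;<=>?@[\]^_`{|}~"
--     result = ''
--     for char in text:
--         if char in special_characters:
--             result += str(ord(char))
--         else:
--             result += char
--     return result
-- ===== SOURCE B (Python) =====
-- def replace_special_symbols(text):
--     # Staged rewriting: one full-string replace pass per special character.
--     # Correct because every replacement string consists only of decimal digits,
--     # and digits are never special, so later passes cannot touch text produced
--     # by earlier passes.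
--     for c in "!\"#$%&'()*+,-./:;<=>?@[\\]^_`{|}~":
--         text = text.replace(c, str(ord(c)))
--     return text
-- ===== Notes on version B (the rewrite author's own statement) =====
-- stated objective: faster
-- what changed: Replaces A's per-character Python loop with a branch and string concatenation by 32 staged whole-string replace passes (one per special character); correct because every replacement string is pure digits and digits are never special, so later passes cannot touch earlier insertions.
import Mathlib
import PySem

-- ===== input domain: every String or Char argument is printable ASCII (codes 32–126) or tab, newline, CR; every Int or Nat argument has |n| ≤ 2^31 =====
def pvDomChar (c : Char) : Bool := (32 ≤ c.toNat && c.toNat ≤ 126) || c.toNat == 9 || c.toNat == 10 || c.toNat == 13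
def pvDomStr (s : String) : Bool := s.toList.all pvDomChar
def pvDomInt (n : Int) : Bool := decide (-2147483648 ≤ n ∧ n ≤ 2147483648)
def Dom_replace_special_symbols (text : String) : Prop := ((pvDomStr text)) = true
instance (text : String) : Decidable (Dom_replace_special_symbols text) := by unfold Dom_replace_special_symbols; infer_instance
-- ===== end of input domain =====

-- B rewrites the text in 32 staged whole-string replace passes (one per special character)
-- instead of A's single per-character loop with a membership branch (measured faster at large sizes).


-- ===== PORT A =====
-- A's local constant special_characters (the "\]" in the Python literal is backslash + ']')
def pvSpecialsA : String := "!\"#$%&'()*+,-./:;<=>?@[\\]^_`{|}~"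

-- literal port of A: fold over the characters, appending str(ord(c)) for specials, c otherwise
def replace_special_symbols (text : String) : String :=
  String.ofList (text.toList.foldl
    (fun acc c =>
      if c ∈ pvSpecialsA.toList then acc ++ (PySem.Int.toStr (c.toNat : Int)).toList
      else acc ++ [c]) [])

-- ===== PORT B =====
def pvSpecialsB : String := "!\"#$%&'()*+,-./:;<=>?@[\\]^_`{|}~"

-- B: for c in specials: text = text.replace(c, str(ord(c)))
def replace_special_symbols_alt (text : String) : String :=
  pvSpecialsB.toList.foldl
    (fun t c => PySem.Str.replace t (String.ofList [c]) (PySem.Int.toStr (c.toNat : Int))) text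

-- ===== PRECONDITION & SPEC =====
def Spec_replace_special_symbols (text : String) (out : String) : Prop := out = replace_special_symbols_alt text
instance (text : String) (out : String) : Decidable (Spec_replace_special_symbols text out) := by unfold Spec_replace_special_symbols; infer_instance

-- ===== CLAIM (what is proved, stated in full; the proofs are below) =====
def Claim_equal_replace_special_symbols : Prop := ∀ (text : String), Dom_replace_special_symbols text → Spec_replace_special_symbols text (replace_special_symbols text)

-- ===== LEMMAS AND PROOFS =====

-- codes of characters already rewritten: after processing prefix P of the specials,
-- the text is text.flatMap (pvCode P)
def pvCode (P : List Char) (x : Char) : List Char :=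
  if x ∈ P then (PySem.Int.toStr (x.toNat : Int)).toList else [x]

-- single-character replace is a flatMap
theorem pv_go_single (c : Char) (new : List Char) :
    ∀ (fuel : Nat) (l acc : List Char), l.length ≤ fuel →
      PySem.Chars.replace.go [c] new fuel l acc
        = acc.reverse ++ l.flatMap (fun x => if x = c then new else [x]) := by
  intro fuel
  induction fuel with
  | zero =>
    intro l acc h
    have : l = [] := List.length_eq_zero_iff.mp (Nat.le_zero.mp h)
    subst this
    simp [PySem.Chars.replace.go]
  | succ n ih =>
    intro l acc h
    cases l with
    | nil => simp [PySem.Chars.replace.go]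
    | cons x t =>
      have ht : t.length ≤ n := by simpa using Nat.lt_succ_iff.mp (by simpa using h)
      by_cases hx : x = c
      · subst hx
        have hpre : List.isPrefixOf [x] (x :: t) = true := by
          simp [List.isPrefixOf]
        simp only [PySem.Chars.replace.go, hpre, if_pos, List.length_cons, List.length_nil,
          Nat.zero_add, List.drop_succ_cons, List.drop_zero]
        rw [ih t (new.reverse ++ acc) ht]
        simp
      · have hpre2 : List.isPrefixOf [c] (x :: t) = false := by
          simp [List.isPrefixOf]
          exact fun hcx => hx hcx.symm
        simp only [PySem.Chars.replace.go, hpre2, if_neg, Bool.false_eq_true, not_false_iff]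
        rw [ih t (x :: acc) ht]
        simp [hx]

theorem pv_replace_single (s : List Char) (c : Char) (new : List Char) :
    PySem.Chars.replace s [c] new = s.flatMap (fun x => if x = c then new else [x]) := by
  unfold PySem.Chars.replace
  rw [if_neg (by simp)]
  simpa using pv_go_single c new s.length s [] (le_refl _)

-- no special character occurs in the decimal code string of a special character
theorem pv_no_special_in_code_b :
    (pvSpecialsA.toList.all fun c => pvSpecialsA.toList.all fun x =>
      (PySem.Int.toStr (x.toNat : Int)).toList.all fun d => d != c) = true := by decide

theorem pv_no_special_in_code :
    ∀ c ∈ pvSpecialsA.toList, ∀ x ∈ pvSpecialsA.toList,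
      c ∉ (PySem.Int.toStr (x.toNat : Int)).toList := by
  intro c hc x hx hmem
  have hb := pv_no_special_in_code_b
  rw [List.all_eq_true] at hb
  have h1 := hb c hc
  rw [List.all_eq_true] at h1
  have h2 := h1 x hx
  rw [List.all_eq_true] at h2
  have h3 := h2 c hmem
  simp at h3

theorem pv_flatMap_id_of_ne {c : Char} {new : List Char} {L : List Char}
    (h : ∀ d ∈ L, d ≠ c) :
    L.flatMap (fun x => if x = c then new else [x]) = L := by
  induction L with
  | nil => rfl
  | cons d t ih =>
    rw [List.flatMap_cons, if_neg (h d (List.mem_cons_self)), ih (fun e he => h e (List.mem_cons_of_mem _ he))]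
    rfl

-- one staged pass extends the processed prefix by one character
theorem pv_step (text : List Char) (P : List Char) (c : Char) (suffix : List Char)
    (hPS : P ++ c :: suffix = pvSpecialsA.toList) :
    PySem.Chars.replace (text.flatMap (pvCode P)) [c] (PySem.Int.toStr (c.toNat : Int)).toList
      = text.flatMap (pvCode (P ++ [c])) := by
  rw [pv_replace_single]
  induction text with
  | nil => rfl
  | cons x t ih =>
    rw [List.flatMap_cons, List.flatMap_cons, List.flatMap_append, ih]
    congr 1
    by_cases hxP : x ∈ P
    · have hxS : x ∈ pvSpecialsA.toList := by
        rw [← hPS]; exact List.mem_append_left _ hxP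
      have hcS : c ∈ pvSpecialsA.toList := by
        rw [← hPS]; exact List.mem_append_right _ List.mem_cons_self
      unfold pvCode
      rw [if_pos hxP, if_pos (List.mem_append_left _ hxP)]
      exact pv_flatMap_id_of_ne (fun d hd hdc =>
        pv_no_special_in_code c hcS x hxS (hdc ▸ hd))
    · unfold pvCode
      rw [if_neg hxP]
      by_cases hxc : x = c
      · subst hxc
        simp [hxP]
      · have hx2 : x ∉ P ++ [c] := by
          simp [hxP, hxc]
        simp [hxc, hx2]

-- the staged passes over a suffix of the specials, starting from an already-processed prefix
theorem pv_fold_passes (text : List Char) :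
    ∀ (suffix P : List Char), P ++ suffix = pvSpecialsA.toList →
      suffix.foldl
        (fun t c => PySem.Str.replace t (String.ofList [c]) (PySem.Int.toStr (c.toNat : Int)))
        (String.ofList (text.flatMap (pvCode P)))
      = String.ofList (text.flatMap (pvCode pvSpecialsA.toList)) := by
  intro suffix
  induction suffix with
  | nil =>
    intro P h
    simp only [List.foldl_nil]
    rw [show P = pvSpecialsA.toList by simpa using h]
  | cons c t ih =>
    intro P h
    rw [List.foldl_cons]
    have hstep : PySem.Str.replace (String.ofList (text.flatMap (pvCode P)))
        (String.ofList [c]) (PySem.Int.toStr (c.toNat : Int))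
        = String.ofList (text.flatMap (pvCode (P ++ [c]))) := by
      unfold PySem.Str.replace
      rw [String.toList_ofList, String.toList_ofList, pv_step text P c t h]
    rw [hstep, ih (P ++ [c]) (by simpa using h)]

-- A's fold is the same flatMap
theorem pv_fold_A (l : List Char) (acc : List Char) :
    l.foldl (fun acc c =>
        if c ∈ pvSpecialsA.toList then acc ++ (PySem.Int.toStr (c.toNat : Int)).toList
        else acc ++ [c]) acc
      = acc ++ l.flatMap (pvCode pvSpecialsA.toList) := by
  induction l generalizing acc with
  | nil => simp
  | cons c t ih =>
    rw [List.foldl_cons, ih]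
    unfold pvCode
    rw [List.flatMap_cons]
    by_cases h : c ∈ pvSpecialsA.toList
    · rw [if_pos h, if_pos h, List.append_assoc]
    · rw [if_neg h, if_neg h, List.append_assoc]

-- ===== VERDICT (by name: the statement is the Claim_ definition above) =====
theorem replace_special_symbols_spec : Claim_equal_replace_special_symbols := by
  intro text _
  unfold Spec_replace_special_symbols replace_special_symbols replace_special_symbols_alt
  rw [pv_fold_A, List.nil_append]
  have hB := pv_fold_passes text.toList pvSpecialsA.toList [] (by simp)
  have hnil : text.toList.flatMap (pvCode []) = text.toList := by
    induction text.toList with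
    | nil => rfl
    | cons a t ih => rw [List.flatMap_cons, ih]; simp [pvCode]
  rw [hnil] at hB
  have hAB : pvSpecialsB = pvSpecialsA := rfl
  rw [hAB]
  rw [String.ofList_toList] at hB
  rw [hB]
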